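-- pv_equiv track=rewrite | github.com/core-dump-19700101/AdventOfCode2021 | day3/d3p1.py | build_bit_frequency
-- ===== SOURCE A (Python) =====
-- def build_bit_frequency(lines):
--     dict = {}
--     for line in lines:
--         for i in range(0, len(line) - 1):
--             if i not in dict:
--                 dict[i] = [0, 0]
--             dict[i][int(line[i])] += 1
--     return dict
-- ===== SOURCE B (Python) =====
-- def build_bit_frequency(lines):
--     if not lines:
--         return {}
--     width = max(len(line) - 1 for line in lines)
--     freq = {}
--     for i in range(width):
--         contributors = [line for line in lines if len(line) - 1 > i]
--         ones = sum(int(line[i]) for line in contributors)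
--         freq[i] = [len(contributors) - ones, ones]
--     return freq
-- ===== Notes on version B (the rewrite author's own statement) =====
-- stated objective: alternative
-- what changed: Column-major instead of row-major: for each bit position the ones are counted in one pass over the lines and zeros derived by subtraction, instead of incrementing a per-position pair while scanning each line's characters.
import Mathlib
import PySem

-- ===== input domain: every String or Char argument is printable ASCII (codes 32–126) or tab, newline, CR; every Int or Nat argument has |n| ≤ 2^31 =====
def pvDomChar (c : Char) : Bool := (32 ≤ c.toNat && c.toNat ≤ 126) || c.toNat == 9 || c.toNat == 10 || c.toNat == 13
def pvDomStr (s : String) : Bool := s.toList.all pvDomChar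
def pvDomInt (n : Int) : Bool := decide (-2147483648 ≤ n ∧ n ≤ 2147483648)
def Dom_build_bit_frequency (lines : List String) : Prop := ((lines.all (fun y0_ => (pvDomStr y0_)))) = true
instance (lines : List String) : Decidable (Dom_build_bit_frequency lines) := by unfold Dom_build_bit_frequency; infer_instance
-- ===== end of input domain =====

-- B builds the table column-major (per bit position, ones counted in one pass, zeros by subtraction)
-- instead of A's row-major per-character increments; alternative decomposition, no speed claim.

-- ===== PORT A =====
-- body of A's inner loop: ensure dict[i] exists, then dict[i][int(line[i])] += 1
def pvStepA (line : String) (d : PySem.Dict Int (List Int)) (i : Int) : PySem.Dict Int (List Int) :=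
  let d := if d.contains i then d else d.insert i ([0, 0] : List Int)
  match d.get? i, PySem.Str.pyGet? line i with
  | some v, some c =>
    match PySem.Int.ofStr? (String.ofList [c]) with
    | some j => d.insert i (PySem.List.pySetD v j (PySem.List.pyGetD v j 0 + 1))
    | none => d        -- int(line[i]) raises ValueError here: outside Pre_
  | _, _ => d          -- unreachable: the key was just ensured and i is in range

def pvLineA (d : PySem.Dict Int (List Int)) (line : String) : PySem.Dict Int (List Int) :=
  (PySem.List.pyRange 0 (PySem.Str.len line - 1) 1).foldl (pvStepA line) d

def build_bit_frequency (lines : List String) : List (Int × List Int) :=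
  (lines.foldl pvLineA (PySem.Dict.empty : PySem.Dict Int (List Int))).items

-- ===== PORT B =====
-- loop body of B: the [zeros, ones] entry for bit position i.
-- int(line[i]): line[i] is in range for every contributor; the none/getD fallbacks are
-- unreachable under Pre_ (outside Pre_, the Python raises ValueError and nothing is claimed)
def pvColB (lines : List String) (i : Int) : List Int :=
  let contributors := lines.filter (fun line => decide (PySem.Str.len line - 1 > i))
  let ones : Int := (contributors.map (fun line =>
      match PySem.Str.pyGet? line i with
      | some c => (PySem.Int.ofStr? (String.ofList [c])).getD 0
      | none => 0)).sum
  [(contributors.length : Int) - ones, ones]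

def build_bit_frequency_alt (lines : List String) : List (Int × List Int) :=
  if lines = [] then []
  else
    -- max(len(line) - 1 for line in lines); the list is nonempty here so max? is some
    let width : Int := (PySem.List.max? (lines.map (fun line => PySem.Str.len line - 1)) (fun x => x)).getD 0
    ((PySem.List.pyRange 0 width 1).foldl (fun d i => d.insert i (pvColB lines i))
      (PySem.Dict.empty : PySem.Dict Int (List Int))).items

-- ===== PRECONDITION & SPEC =====
-- Pre_ excludes inputs where some line has a character other than '0'/'1' before its last
-- position: there A raises (ValueError for non-digits, IndexError for digits 2-9).
def Pre_build_bit_frequency (lines : List String) : Prop :=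
  (lines.all (fun l => l.toList.dropLast.all (fun c => c == '0' || c == '1'))) = true
instance (lines : List String) : Decidable (Pre_build_bit_frequency lines) := by
  unfold Pre_build_bit_frequency; infer_instance

def pvWitness_build_bit_frequency : List String := ["01", "10", "1"]

def Spec_build_bit_frequency (lines : List String) (out : List (Int × List Int)) : Prop :=
  out = build_bit_frequency_alt lines
instance (lines : List String) (out : List (Int × List Int)) : Decidable (Spec_build_bit_frequency lines out) := by
  unfold Spec_build_bit_frequency; infer_instance

-- ===== CLAIM (what is proved, stated in full; the proofs are below) =====
def Claim_equal_build_bit_frequency : Prop := ∀ (lines : List String), Dom_build_bit_frequency lines → Pre_build_bit_frequency lines → Spec_build_bit_frequency lines (build_bit_frequency lines)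

-- ===== LEMMAS AND PROOFS =====

theorem pvPre_chars (lines : List String) (h : Pre_build_bit_frequency lines) :
    ∀ l ∈ lines, ∀ c ∈ l.toList.dropLast, c = '0' ∨ c = '1' := by
  intro l hl c hc
  unfold Pre_build_bit_frequency at h
  rw [List.all_eq_true] at h
  have h2 := h l hl
  rw [List.all_eq_true] at h2
  simpa using h2 c hc

-- count of lines whose character at position i is c, among lines long enough that
-- A's inner loop (range(len-1)) reaches position i
def pvCnt (c : Char) (P : List String) (i : Nat) : Nat :=
  P.countP (fun l => decide (l.toList[i]? = some c ∧ i + 1 < l.toList.length))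

-- highest position any line reaches, i.e. max over lines of (len - 1) (Nat-truncated)
def pvW (P : List String) : Nat := P.foldl (fun m l => max m (l.toList.length - 1)) 0

def pvTbl (P : List String) (w : Nat) : List (Int × List Int) :=
  (List.range w).map (fun (i : Nat) => ((i : Int), [(pvCnt '0' P i : Int), (pvCnt '1' P i : Int)]))

-- dict states reached by A: keys 0..w-1 in order, values given by f
def pvMk (w : Nat) (f : Nat → List Int) : PySem.Dict Int (List Int) :=
  PySem.Dict.mk ((List.range w).map (fun i => (Int.ofNat i, f i)))

theorem pvMk_congr (w : Nat) (f g : Nat → List Int) (h : ∀ i < w, f i = g i) :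
    pvMk w f = pvMk w g := by
  unfold pvMk
  congr 1
  apply List.map_congr_left
  intro i hi
  rw [h i (List.mem_range.mp hi)]

theorem pvMk_keys_nodup (w : Nat) (f : Nat → List Int) : (pvMk w f).keys.Nodup := by
  have : (pvMk w f).keys = (List.range w).map Int.ofNat := by
    simp [pvMk, PySem.Dict.keys, List.map_map, Function.comp_def]
  rw [this]
  exact List.Nodup.map (fun a b h => Int.ofNat.inj h) List.nodup_range

theorem pvMk_contains (w : Nat) (f : Nat → List Int) (k : Nat) :
    (pvMk w f).contains (Int.ofNat k) = decide (k < w) := by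
  rw [PySem.Dict.contains_eq_decide_mem_keys]
  have : (pvMk w f).keys = (List.range w).map Int.ofNat := by
    simp [pvMk, PySem.Dict.keys, List.map_map, Function.comp_def]
  rw [this]
  simp only [decide_eq_decide, List.mem_map, List.mem_range]
  constructor
  · rintro ⟨a, ha, he⟩; rwa [← Int.ofNat.inj he]
  · exact fun h => ⟨k, h, rfl⟩

theorem pvMk_get? (w : Nat) (f : Nat → List Int) (k : Nat) (hk : k < w) :
    (pvMk w f).get? (Int.ofNat k) = some (f k) := by
  exact PySem.Dict.get?_of_mem_items _
    (List.mem_map.mpr ⟨k, List.mem_range.mpr hk, rfl⟩) (pvMk_keys_nodup w f)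

theorem pvMk_insert_mem (w : Nat) (f : Nat → List Int) (k : Nat) (hk : k < w) (v : List Int) :
    (pvMk w f).insert (Int.ofNat k) v = pvMk w (fun i => if i = k then v else f i) := by
  unfold pvMk
  apply PySem.Dict.ext
  rw [PySem.Dict.items_insert_of_contains _ _ (by
    have := pvMk_contains w f k
    unfold pvMk at this
    rw [this]
    simpa using hk)]
  show ((List.range w).map _).map _ = _
  rw [List.map_map]
  apply List.map_congr_left
  intro i hi
  by_cases hik : i = k
  · subst hik; simp
  · simp only [Function.comp_apply]
    rw [if_neg (by simpa using fun h => hik (Int.ofNat.inj h))]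
    rw [if_neg hik]

theorem pvMk_insert_fresh (w : Nat) (f : Nat → List Int) (v : List Int) :
    (pvMk w f).insert (Int.ofNat w) v = pvMk (w + 1) (fun i => if i = w then v else f i) := by
  unfold pvMk
  apply PySem.Dict.ext
  rw [PySem.Dict.items_insert_of_not_contains _ _ (by
    have := pvMk_contains w f w
    unfold pvMk at this
    rw [this]
    simp)]
  show ((List.range w).map _) ++ _ = (List.range (w + 1)).map _
  rw [List.range_succ, List.map_append]
  congr 1
  · apply List.map_congr_left
    intro i hi
    simp only []
    rw [if_neg (Nat.ne_of_lt (List.mem_range.mp hi))]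
  · simp

-- positions at or past the running maximum have no contributors yet
theorem pvCnt_zero (c : Char) (P : List String) (k : Nat) (hk : pvW P ≤ k) :
    pvCnt c P k = 0 := by
  unfold pvCnt
  rw [List.countP_eq_length_filter, List.length_eq_zero_iff, List.filter_eq_nil_iff]
  intro l hl
  have hle : l.toList.length - 1 ≤ pvW P :=
    (PySem.List.le_foldl_max_nat P (fun s => s.toList.length - 1) 0).2 l hl
  simp only [decide_eq_true_eq, not_and]
  intro _
  omega

theorem pvCnt_append (c : Char) (P : List String) (l : String) (i : Nat) :
    pvCnt c (P ++ [l]) i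
      = pvCnt c P i + (if l.toList[i]? = some c ∧ i + 1 < l.toList.length then 1 else 0) := by
  unfold pvCnt
  rw [List.countP_append]
  simp [List.countP_cons]

theorem pvOfStr_zero : PySem.Int.ofStr? (String.ofList ['0']) = some 0 := by decide
theorem pvOfStr_one : PySem.Int.ofStr? (String.ofList ['1']) = some 1 := by decide

theorem pvBump_zero (a b : Int) :
    PySem.List.pySetD [a, b] 0 (PySem.List.pyGetD [a, b] 0 0 + 1) = [a + 1, b] := by
  rfl

theorem pvBump_one (a b : Int) :
    PySem.List.pySetD [a, b] 1 (PySem.List.pyGetD [a, b] 1 0 + 1) = [a, b + 1] := by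
  rfl

-- one step of A's inner loop on a table-shaped dict, at a position holding '0' or '1'
theorem pvStepA_eq (l : String) (g0 g1 : Nat → Int) (m k : Nat) (hm : k ≤ m)
    (hk : k + 1 < l.toList.length)
    (hch : l.toList[k] = '0' ∨ l.toList[k] = '1')
    (hz : m ≤ k → g0 k = 0 ∧ g1 k = 0) :
    pvStepA l (pvMk m (fun i => [g0 i, g1 i])) (Int.ofNat k)
      = pvMk (max m (k + 1)) (fun i =>
          if i = k then
            (if l.toList[k] = '0' then [g0 k + 1, g1 k] else [g0 k, g1 k + 1])
          else [g0 i, g1 i]) := by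
  have hlen : k < l.toList.length := by omega
  have hget : PySem.Str.pyGet? l (Int.ofNat k) = some l.toList[k] := by
    simp only [Int.ofNat_eq_natCast, PySem.Str.pyGet?_natCast]
    exact List.getElem?_eq_getElem hlen
  by_cases hkm : k < m
  · have hmax : max m (k + 1) = m := by omega
    rw [hmax]
    simp only [pvStepA, pvMk_contains, hkm, decide_true, if_true, hget,
      pvMk_get? m _ k hkm]
    rcases hch with h | h
    · rw [h, pvOfStr_zero]
      simp only []
      rw [pvBump_zero, pvMk_insert_mem m _ k hkm]
      apply pvMk_congr
      intro i _
      by_cases hik : i = k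
      · subst hik; simp
      · simp [hik]
    · rw [h, pvOfStr_one]
      simp only []
      rw [pvBump_one, pvMk_insert_mem m _ k hkm]
      apply pvMk_congr
      intro i _
      by_cases hik : i = k
      · subst hik; simp
      · simp [hik]
  · have hkm' : k = m := by omega
    subst hkm'
    have hz' := hz (le_refl k)
    have hmax : max k (k + 1) = k + 1 := by omega
    rw [hmax]
    simp only [pvStepA, pvMk_contains, lt_irrefl, decide_false, Bool.false_eq_true, if_false,
      pvMk_insert_fresh k _ ([0, 0] : List Int), hget]
    have hg : (pvMk (k + 1) (fun i => if i = k then ([0, 0] : List Int) else [g0 i, g1 i])).get?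
        (Int.ofNat k) = some [0, 0] := by
      rw [pvMk_get? (k + 1) _ k (by omega)]
      simp
    rw [hg]
    rcases hch with h | h
    · rw [h]
      simp only []
      rw [pvOfStr_zero]
      simp only []
      rw [pvBump_zero, pvMk_insert_mem (k + 1) _ k (by omega)]
      apply pvMk_congr
      intro i _
      by_cases hik : i = k
      · subst hik; simp [hz'.1, hz'.2]
      · simp [hik]
    · rw [h]
      simp only []
      rw [pvOfStr_one]
      simp only []
      rw [pvBump_one, pvMk_insert_mem (k + 1) _ k (by omega)]
      apply pvMk_congr
      intro i _
      by_cases hik : i = k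
      · subst hik
        have : l.toList[i] = '1' := h
        simp [hz'.1, hz'.2]
      · simp [hik]

theorem pvInner (P : List String) (l : String)
    (hpl : ∀ c ∈ l.toList.dropLast, c = '0' ∨ c = '1') :
    ∀ (k : Nat), k ≤ l.toList.length - 1 →
    (PySem.List.pyRange 0 (Int.ofNat k) 1).foldl (pvStepA l)
        (pvMk (pvW P) (fun i => [(pvCnt '0' P i : Int), (pvCnt '1' P i : Int)]))
      = pvMk (max (pvW P) k) (fun i =>
          [(pvCnt '0' P i : Int) + (if i < k ∧ l.toList[i]? = some '0' then 1 else 0),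
           (pvCnt '1' P i : Int) + (if i < k ∧ l.toList[i]? = some '1' then 1 else 0)]) := by
  intro k
  induction k with
  | zero =>
    intro _
    rw [PySem.List.pyRange_one_eq_nil (by simp), List.foldl_nil]
    have hmax : max (pvW P) 0 = pvW P := by omega
    rw [hmax]
    apply pvMk_congr
    intro i _
    simp
  | succ k ih =>
    intro hk1
    have hk : k ≤ l.toList.length - 1 := by omega
    have hlen : k + 1 < l.toList.length := by omega
    have hsplit : PySem.List.pyRange 0 (Int.ofNat (k + 1)) 1
        = PySem.List.pyRange 0 (Int.ofNat k) 1 ++ [Int.ofNat k] := by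
      have hcast : Int.ofNat (k + 1) = Int.ofNat k + 1 := by simp
      rw [hcast]
      exact PySem.List.pyRange_one_succ_right (by simp only [Int.ofNat_eq_natCast]; omega)
    rw [hsplit, List.foldl_append, List.foldl_cons, List.foldl_nil, ih hk]
    have hd : k < l.toList.dropLast.length := by
      rw [List.length_dropLast]; omega
    have hch : l.toList[k] = '0' ∨ l.toList[k] = '1' := by
      have := hpl (l.toList.dropLast[k]) (List.getElem_mem hd)
      rwa [List.getElem_dropLast] at this
    have hgetk : l.toList[k]? = some l.toList[k] := List.getElem?_eq_getElem (by omega)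
    rw [pvStepA_eq l _ _ (max (pvW P) k) k (by omega) hlen hch (by
      intro hle
      have hw : pvW P ≤ k := le_trans (Nat.le_max_left _ _) hle
      constructor <;> simp [pvCnt_zero _ _ _ hw])]
    have hmax : max (max (pvW P) k) (k + 1) = max (pvW P) (k + 1) := by omega
    rw [hmax]
    apply pvMk_congr
    intro i _
    by_cases hik : i = k
    · subst hik
      rcases hch with h | h <;>
        simp [h, hgetk]
    · rw [if_neg hik]
      have h0 : (i < k + 1 ∧ l.toList[i]? = some '0') ↔ (i < k ∧ l.toList[i]? = some '0') := by
        constructor <;> exact fun ⟨a, b⟩ => ⟨by omega, b⟩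
      have h1 : (i < k + 1 ∧ l.toList[i]? = some '1') ↔ (i < k ∧ l.toList[i]? = some '1') := by
        constructor <;> exact fun ⟨a, b⟩ => ⟨by omega, b⟩
      rw [if_congr h0 rfl rfl, if_congr h1 rfl rfl]

theorem pvLineA_eq (P : List String) (l : String)
    (hpl : ∀ c ∈ l.toList.dropLast, c = '0' ∨ c = '1') :
    pvLineA (pvMk (pvW P) (fun i => [(pvCnt '0' P i : Int), (pvCnt '1' P i : Int)])) l
      = pvMk (pvW (P ++ [l]))
          (fun i => [(pvCnt '0' (P ++ [l]) i : Int), (pvCnt '1' (P ++ [l]) i : Int)]) := by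
  have hW : pvW (P ++ [l]) = max (pvW P) (l.toList.length - 1) := by
    unfold pvW
    rw [List.foldl_append, List.foldl_cons, List.foldl_nil]
  unfold pvLineA
  rcases Nat.eq_zero_or_pos l.toList.length with hn | hn
  · rw [PySem.Str.len_eq, hn]
    rw [PySem.List.pyRange_one_eq_nil (by omega), List.foldl_nil]
    have : pvW (P ++ [l]) = pvW P := by rw [hW]; omega
    rw [this]
    apply pvMk_congr
    intro i _
    rw [pvCnt_append, pvCnt_append]
    have hfalse : ¬ (i + 1 < l.toList.length) := by omega
    rw [if_neg (fun h => hfalse h.2), if_neg (fun h => hfalse h.2)]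
    push_cast
    ring_nf
  · have hcast : PySem.Str.len l - 1 = Int.ofNat (l.toList.length - 1) := by
      rw [PySem.Str.len_eq]
      simp only [Int.ofNat_eq_natCast]
      omega
    rw [hcast, pvInner P l hpl (l.toList.length - 1) (le_refl _), ← hW]
    apply pvMk_congr
    intro i _
    rw [pvCnt_append, pvCnt_append]
    have h0 : (i < l.toList.length - 1 ∧ l.toList[i]? = some '0')
        ↔ (l.toList[i]? = some '0' ∧ i + 1 < l.toList.length) :=
      ⟨fun ⟨a, b⟩ => ⟨b, by omega⟩, fun ⟨a, b⟩ => ⟨by omega, a⟩⟩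
    have h1 : (i < l.toList.length - 1 ∧ l.toList[i]? = some '1')
        ↔ (l.toList[i]? = some '1' ∧ i + 1 < l.toList.length) :=
      ⟨fun ⟨a, b⟩ => ⟨b, by omega⟩, fun ⟨a, b⟩ => ⟨by omega, a⟩⟩
    rw [if_congr h0 rfl rfl, if_congr h1 rfl rfl]
    push_cast
    ring_nf

theorem pvTbl_mk (P : List String) :
    PySem.Dict.mk (pvTbl P (pvW P))
      = pvMk (pvW P) (fun i => [(pvCnt '0' P i : Int), (pvCnt '1' P i : Int)]) := by
  unfold pvTbl pvMk
  congr 1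

theorem pvA_items : ∀ (P : List String), Pre_build_bit_frequency P →
    P.foldl pvLineA (PySem.Dict.empty : PySem.Dict Int (List Int)) = PySem.Dict.mk (pvTbl P (pvW P)) := by
  intro P
  induction P using List.reverseRecOn with
  | nil => intro _; rfl
  | append_singleton P l ih =>
    intro hpre'
    have hpre := pvPre_chars _ hpre'
    have hpP : Pre_build_bit_frequency P := by
      unfold Pre_build_bit_frequency at hpre' ⊢
      rw [List.all_eq_true] at hpre' ⊢
      exact fun l hl => hpre' l (by simp [hl])
    have hpl : ∀ c ∈ l.toList.dropLast, c = '0' ∨ c = '1' := hpre l (by simp)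
    rw [List.foldl_append, List.foldl_cons, List.foldl_nil, ih hpP, pvTbl_mk, pvTbl_mk,
      pvLineA_eq P l hpl]

theorem pvToNat_foldl_max (l : List String) : ∀ (a : Int),
    (l.foldl (fun m s => max m (PySem.Str.len s - 1)) a).toNat
      = l.foldl (fun m s => max m (s.toList.length - 1)) a.toNat := by
  induction l with
  | nil => intro a; rfl
  | cons s t ih =>
    intro a
    simp only [List.foldl_cons]
    rw [ih]
    congr 1
    rw [PySem.Str.len_eq]
    omega

theorem pvW_cons (s : String) (t : List String) :
    pvW (s :: t) = t.foldl (fun m l => max m (l.toList.length - 1)) (s.toList.length - 1) := by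
  unfold pvW
  simp only [List.foldl_cons, Nat.zero_max]

theorem pvWidth_toNat (s : String) (t : List String) :
    ((PySem.List.max? ((s :: t).map (fun l => PySem.Str.len l - 1)) (fun x => x)).getD 0).toNat
      = pvW (s :: t) := by
  rw [List.map_cons, PySem.List.max?_id_cons, Option.getD_some, List.foldl_map,
    pvToNat_foldl_max, pvW_cons]
  congr 1
  rw [PySem.Str.len_eq]
  omega

-- among lines reaching position n every character is '0' or '1', so the contributors split
theorem pvCnt_split (n : Nat) : ∀ (lines : List String),
    (∀ l ∈ lines, ∀ c ∈ l.toList.dropLast, c = '0' ∨ c = '1') →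
    lines.countP (fun l => decide (n + 1 < l.toList.length))
      = pvCnt '0' lines n + pvCnt '1' lines n := by
  intro lines
  induction lines with
  | nil => intro _; rfl
  | cons s t ih =>
    intro hpre
    have hpt : ∀ l ∈ t, ∀ c ∈ l.toList.dropLast, c = '0' ∨ c = '1' :=
      fun l hl => hpre l (List.mem_cons_of_mem _ hl)
    unfold pvCnt at ih ⊢
    simp only [List.countP_cons]
    rw [ih hpt]
    by_cases hn : n + 1 < s.toList.length
    · have hd : n < s.toList.dropLast.length := by
        rw [List.length_dropLast]; omega
      have hchar := hpre s List.mem_cons_self (s.toList.dropLast[n]) (List.getElem_mem hd)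
      rw [List.getElem_dropLast] at hchar
      have hget : s.toList[n]? = some s.toList[n] := List.getElem?_eq_getElem (by omega)
      have hn' : n + 1 < s.toList.length := hn
      rcases hchar with h0 | h1
      · simp only [hget, h0, hn', decide_eq_true_eq]
        simp
        omega
      · simp only [hget, h1, hn', decide_eq_true_eq]
        simp
        omega
    · have h1 : (decide (n + 1 < s.toList.length)) = false := by simpa using hn
      have h2 : (decide (s.toList[n]? = some '0' ∧ n + 1 < s.toList.length)) = false := by
        simp only [decide_eq_false_iff_not]
        intro h; exact hn h.2
      have h3 : (decide (s.toList[n]? = some '1' ∧ n + 1 < s.toList.length)) = false := by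
        simp only [decide_eq_false_iff_not]
        intro h; exact hn h.2
      rw [h1, h2, h3]
      simp

theorem pvSum_ones (n : Nat) : ∀ (lines : List String),
    (∀ l ∈ lines, ∀ c ∈ l.toList.dropLast, c = '0' ∨ c = '1') →
    ((lines.filter (fun l => decide (n + 1 < l.toList.length))).map (fun line =>
        match PySem.Str.pyGet? line (n : Int) with
        | some c => (PySem.Int.ofStr? (String.ofList [c])).getD 0
        | none => 0)).sum = (pvCnt '1' lines n : Int) := by
  intro lines
  induction lines with
  | nil => intro _; rfl
  | cons s t ih =>
    intro hpre
    have hpt : ∀ l ∈ t, ∀ c ∈ l.toList.dropLast, c = '0' ∨ c = '1' :=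
      fun l hl => hpre l (List.mem_cons_of_mem _ hl)
    rw [List.filter_cons]
    unfold pvCnt
    rw [List.countP_cons]
    by_cases hn : n + 1 < s.toList.length
    · rw [if_pos (by simpa using hn), List.map_cons, List.sum_cons, ih hpt]
      have hget : PySem.Str.pyGet? s (n : Int) = some s.toList[n] := by
        rw [PySem.Str.pyGet?_natCast]
        exact List.getElem?_eq_getElem (by omega)
      rw [hget]
      simp only []
      have hd : n < s.toList.dropLast.length := by rw [List.length_dropLast]; omega
      have hch := hpre s List.mem_cons_self (s.toList.dropLast[n]) (List.getElem_mem hd)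
      rw [List.getElem_dropLast] at hch
      have hsome : s.toList[n]? = some s.toList[n] := List.getElem?_eq_getElem (by omega)
      unfold pvCnt
      rcases hch with h | h
      · rw [h, pvOfStr_zero]
        have hc : decide (s.toList[n]? = some '1' ∧ n + 1 < s.toList.length) = false := by
          simp [hsome, h]
        rw [hc]
        simp
      · rw [h, pvOfStr_one]
        have hc : decide (s.toList[n]? = some '1' ∧ n + 1 < s.toList.length) = true := by
          simp [hsome, h]
          simpa using hn
        rw [hc]
        simp only [Option.getD_some]
        push_cast
        ring
    · rw [if_neg (by simpa using hn), ih hpt]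
      have hc : decide (s.toList[n]? = some '1' ∧ n + 1 < s.toList.length) = false := by
        simp only [decide_eq_false_iff_not]
        exact fun hh => hn hh.2
      unfold pvCnt
      rw [hc]
      simp

theorem pvColB_eq (lines : List String)
    (hpre : ∀ l ∈ lines, ∀ c ∈ l.toList.dropLast, c = '0' ∨ c = '1') (n : Nat) :
    pvColB lines (n : Int) = [(pvCnt '0' lines n : Int), (pvCnt '1' lines n : Int)] := by
  simp only [pvColB]
  have hcontr : lines.filter (fun line => decide (PySem.Str.len line - 1 > (n : Int)))
      = lines.filter (fun l => decide (n + 1 < l.toList.length)) := by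
    apply List.filter_congr
    intro l _
    simp only [decide_eq_decide, PySem.Str.len_eq]
    omega
  rw [hcontr]
  rw [pvSum_ones n lines hpre]
  have hlen : (lines.filter (fun l => decide (n + 1 < l.toList.length))).length
      = pvCnt '0' lines n + pvCnt '1' lines n := by
    rw [← List.countP_eq_length_filter]
    exact pvCnt_split n lines hpre
  rw [hlen]
  push_cast
  ring_nf

theorem pvB_eq : ∀ (lines : List String), Pre_build_bit_frequency lines →
    build_bit_frequency_alt lines = pvTbl lines (pvW lines) := by
  intro lines hpre'
  have hpre := pvPre_chars lines hpre'
  cases lines with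
  | nil => rfl
  | cons s t =>
    simp only [build_bit_frequency_alt]
    rw [if_neg (by simp)]
    have hrng : PySem.List.pyRange 0
        ((PySem.List.max? ((s :: t).map (fun l => PySem.Str.len l - 1)) (fun x => x)).getD 0) 1
        = (List.range (pvW (s :: t))).map Int.ofNat := by
      rw [PySem.List.pyRange_one]
      rw [Int.sub_zero, pvWidth_toNat]
      apply List.map_congr_left
      intro k _
      simp
    rw [hrng]
    rw [PySem.Dict.items_foldl_insert_fresh _ (fun i => i) (pvColB (s :: t)) _
      (fun a _ => PySem.Dict.contains_empty a)
      (by simpa using List.Nodup.map (f := Int.ofNat) (fun a b h => Int.ofNat.inj h) List.nodup_range)]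
    unfold pvTbl
    simp only [List.map_map]
    apply List.map_congr_left
    intro n hn
    simp only [Function.comp_apply, Int.ofNat_eq_natCast]
    rw [pvColB_eq (s :: t) hpre n]

-- ===== VERDICT (by name: the statement is the Claim_ definition above) =====
theorem build_bit_frequency_spec : Claim_equal_build_bit_frequency := by
  intro lines _ hpre
  unfold Spec_build_bit_frequency build_bit_frequency
  rw [pvA_items lines hpre, pvB_eq lines hpre]
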